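-- pv_equiv track=rewrite | github.com/suttree/HausTones | melodies/musical/utils.py | notes_from_scale
-- ===== SOURCE A (Python) =====
-- def notes_from_scale(starting_note, intervals, octave=4):
--     starting_note = starting_note[0].upper()
--
--     # Define the order of notes in the musical alphabet
--     musical_alphabet = ['C', 'C#', 'D', 'D#', 'E', 'F', 'F#', 'G', 'G#', 'A', 'A#', 'B']
--
--     # Initialize a list to store the notes
--     scale = []
--
--     # Find the index of the starting note in the musical alphabet
--     current_note_index = musical_alphabet.index(starting_note)
--
--     # Append the starting note to the scale with the specified octave
--     scale.append(starting_note + str(octave))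
--
--     for interval in intervals[:-1]:  # Exclude the last interval
--         # Calculate the next note index by adding the interval to the current note index
--         next_note_index = (current_note_index + interval) % 12
--
--         # Determine the octave of the next note
--         if next_note_index < current_note_index:
--             octave += 1
--
--         next_note = musical_alphabet[next_note_index]
--
--         # Append the next note to the scale with the appropriate octave
--         scale.append(next_note + str(octave))
--
--         # Update the current note index for the next iteration
--         current_note_index = next_note_index
--
--     return scale
-- ===== SOURCE B (Python) =====
-- def notes_from_scale(starting_note, intervals, octave=4):
--     musical_alphabet = ['C', 'C#', 'D', 'D#', 'E', 'F', 'F#', 'G', 'G#', 'A', 'A#', 'B']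
--     # First pass: the pitch-class sequence (prefix sums mod 12, last interval dropped).
--     pc = musical_alphabet.index(starting_note[0].upper())
--     pcs = [pc]
--     for step in intervals[:-1]:
--         pc = (pc + step) % 12
--         pcs.append(pc)
--     # Second pass: the octave of each note rises once per descent in pitch class.
--     o = octave
--     octaves = [o]
--     for prev, cur in zip(pcs, pcs[1:]):
--         o += cur < prev
--         octaves.append(o)
--     return [musical_alphabet[p] + str(o) for p, o in zip(pcs, octaves)]
-- ===== Notes on version B (the rewrite author's own statement) =====
-- stated objective: alternative
-- what changed: Replaces A's single loop that interleaves index stepping, octave bumping and string building with three separate passes: a prefix-sum pass building the pitch-class sequence mod 12, a pass deriving each octave as a running count of pitch-class descents, and a final rendering pass zipping the two.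
import Mathlib
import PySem

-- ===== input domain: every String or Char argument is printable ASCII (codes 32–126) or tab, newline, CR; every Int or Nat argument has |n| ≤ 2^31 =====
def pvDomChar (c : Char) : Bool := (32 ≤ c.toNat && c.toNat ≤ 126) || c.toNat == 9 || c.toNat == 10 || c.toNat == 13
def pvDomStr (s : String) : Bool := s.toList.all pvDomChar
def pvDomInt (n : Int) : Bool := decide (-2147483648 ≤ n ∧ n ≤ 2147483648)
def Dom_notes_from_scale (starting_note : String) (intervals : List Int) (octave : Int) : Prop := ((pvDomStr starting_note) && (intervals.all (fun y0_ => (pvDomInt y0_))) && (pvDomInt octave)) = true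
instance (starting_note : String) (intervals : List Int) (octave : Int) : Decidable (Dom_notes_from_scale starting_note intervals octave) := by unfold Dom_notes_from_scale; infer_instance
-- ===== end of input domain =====

-- B computes the scale in separate passes — pitch classes as running mod-12 prefix sums, then
-- octaves as a running descent count, then one rendering pass — instead of A's single loop that
-- interleaves all three; objective: alternative decomposition, same cost.

-- ===== PORT A =====
-- the musical alphabet, shared literal table of both Pythons (each note as its character list)
def pvAlphabet : List (List Char) :=
  [['C'], ['C','#'], ['D'], ['D','#'], ['E'], ['F'], ['F','#'], ['G'], ['G','#'], ['A'], ['A','#'], ['B']]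

def notes_from_scale (starting_note : String) (intervals : List Int) (octave : Int) : List String :=
  match PySem.Str.pyGet? starting_note 0 with
  | none => []      -- IndexError in Python: excluded by Pre_
  | some c0 =>
    let start : List Char := [PySem.Chars.upperChar c0]
    match PySem.List.index? pvAlphabet start with
    | none => []    -- ValueError in Python: excluded by Pre_
    | some i0 =>
      ((PySem.List.slice intervals none (some (-1))).foldl
        (fun (st : List String × Int × Int) interval =>
          let next := PySem.Int.mod (st.2.1 + interval) 12
          let oct := if next < st.2.1 then st.2.2 + 1 else st.2.2
          (st.1 ++ [String.ofList (PySem.List.pyGetD pvAlphabet next [] ++ PySem.Int.toChars oct)],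
           next, oct))
        ([String.ofList (start ++ PySem.Int.toChars octave)], (i0 : Int), octave)).1

-- ===== PORT B =====
def notes_from_scale_alt (starting_note : String) (intervals : List Int) (octave : Int) : List String :=
  match PySem.Str.pyGet? starting_note 0 with
  | none => []      -- IndexError in Python: excluded by Pre_
  | some c0 =>
    match PySem.List.index? pvAlphabet [PySem.Chars.upperChar c0] with
    | none => []    -- ValueError in Python: excluded by Pre_
    | some i0 =>
      -- first pass: pitch classes
      let pcs := ((PySem.List.slice intervals none (some (-1))).foldl
        (fun (st : List Int × Int) step =>
          let pc := PySem.Int.mod (st.2 + step) 12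
          (st.1 ++ [pc], pc)) ([(i0 : Int)], (i0 : Int))).1
      -- second pass: octaves from descents
      let octs := ((pcs.zip (PySem.List.slice pcs (some 1) none)).foldl
        (fun (st : List Int × Int) pr =>
          let o := st.2 + (if pr.2 < pr.1 then 1 else 0)
          (st.1 ++ [o], o)) ([octave], octave)).1
      -- third pass: render
      (pcs.zip octs).map (fun po =>
        String.ofList (PySem.List.pyGetD pvAlphabet po.1 [] ++ PySem.Int.toChars po.2))

-- ===== PRECONDITION & SPEC =====
-- Pre_ excludes exactly the inputs where Python A raises: the empty string (IndexError on
-- starting_note[0]) and first characters whose uppercase is not a natural note name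
-- (ValueError from musical_alphabet.index).
def Pre_notes_from_scale (starting_note : String) (intervals : List Int) (octave : Int) : Prop :=
  starting_note.toList ≠ [] ∧
  [PySem.Chars.upperChar (starting_note.toList.headD ' ')] ∈ pvAlphabet
instance (starting_note : String) (intervals : List Int) (octave : Int) : Decidable (Pre_notes_from_scale starting_note intervals octave) := by unfold Pre_notes_from_scale; infer_instance

def pvWitness_notes_from_scale : String × List Int × Int := ("C", [2, 2, 1, 2, 2, 2, 1], 4)

def Spec_notes_from_scale (starting_note : String) (intervals : List Int) (octave : Int) (out : List String) : Prop := out = notes_from_scale_alt starting_note intervals octave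
instance (starting_note : String) (intervals : List Int) (octave : Int) (out : List String) : Decidable (Spec_notes_from_scale starting_note intervals octave out) := by unfold Spec_notes_from_scale; infer_instance

-- ===== CLAIM (what is proved, stated in full; the proofs are below) =====
def Claim_equal_notes_from_scale : Prop := ∀ (starting_note : String) (intervals : List Int) (octave : Int), Dom_notes_from_scale starting_note intervals octave → Pre_notes_from_scale starting_note intervals octave → Spec_notes_from_scale starting_note intervals octave (notes_from_scale starting_note intervals octave)

-- ===== LEMMAS AND PROOFS =====

def pvNote (pc oct : Int) : String :=
  String.ofList (PySem.List.pyGetD pvAlphabet pc [] ++ PySem.Int.toChars oct)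

-- the reference chain of notes: what both programs emit
def pvChain (pc oct : Int) : List Int → List String
  | [] => [pvNote pc oct]
  | i :: t =>
      let npc := PySem.Int.mod (pc + i) 12
      pvNote pc oct :: pvChain npc (if npc < pc then oct + 1 else oct) t

def pvPcs (pc : Int) : List Int → List Int
  | [] => [pc]
  | i :: t => pc :: pvPcs (PySem.Int.mod (pc + i) 12) t

def pvOcts (pc oct : Int) : List Int → List Int
  | [] => [oct]
  | i :: t =>
      let npc := PySem.Int.mod (pc + i) 12
      oct :: pvOcts npc (oct + (if npc < pc then 1 else 0)) t

lemma pv_ite (c : Prop) [Decidable c] (o : Int) :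
    o + (if c then (1 : Int) else 0) = if c then o + 1 else o := by
  split_ifs <;> omega

lemma pvChain_head (pc oct : Int) (l : List Int) :
    pvChain pc oct l = pvNote pc oct :: (pvChain pc oct l).tail := by
  cases l <;> rfl

lemma pvPcs_head (pc : Int) (l : List Int) :
    pvPcs pc l = pc :: (pvPcs pc l).tail := by
  cases l <;> rfl

lemma pv_index_pyGetD {α : Type} [BEq α] [LawfulBEq α] (xs : List α) (v d : α) :
    ∀ i : Nat, PySem.List.index? xs v = some i →
      PySem.List.pyGetD xs (i : Int) d = v := by
  induction xs with
  | nil => intro i h; simp [PySem.List.index?] at h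
  | cons x t ih =>
    intro i h
    by_cases hx : x = v
    · subst hx
      rw [PySem.List.index?_cons_self] at h
      cases h
      simp
    · rw [PySem.List.index?_cons_of_ne t hx] at h
      rcases Option.map_eq_some_iff.mp h with ⟨j, hj, rfl⟩
      simp only [PySem.List.pyGetD_natCast]
      simpa [List.getD] using ih j hj

lemma pv_foldA (l : List Int) :
    ∀ (scale : List String) (pc oct : Int),
      (l.foldl
        (fun (st : List String × Int × Int) interval =>
          let next := PySem.Int.mod (st.2.1 + interval) 12
          let oct := if next < st.2.1 then st.2.2 + 1 else st.2.2
          (st.1 ++ [String.ofList (PySem.List.pyGetD pvAlphabet next [] ++ PySem.Int.toChars oct)],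
           next, oct))
        (scale, pc, oct)).1 = scale ++ (pvChain pc oct l).tail := by
  induction l with
  | nil => intro scale pc oct; simp [pvChain]
  | cons i t ih =>
    intro scale pc oct
    simp only [List.foldl_cons]
    rw [ih]
    rw [pvChain, pvChain_head]
    simp [pvNote]

lemma pv_foldPcs (l : List Int) :
    ∀ (acc : List Int) (pc : Int),
      (l.foldl
        (fun (st : List Int × Int) step =>
          let npc := PySem.Int.mod (st.2 + step) 12
          (st.1 ++ [npc], npc)) (acc ++ [pc], pc)).1 = acc ++ pvPcs pc l := by
  induction l with
  | nil => intro acc pc; simp [pvPcs]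
  | cons i t ih =>
    intro acc pc
    simp only [List.foldl_cons]
    have := ih (acc ++ [pc]) (PySem.Int.mod (pc + i) 12)
    simp only [List.append_assoc] at this ⊢
    rw [this, pvPcs]
    simp

lemma pv_foldOcts (l : List Int) :
    ∀ (octs : List Int) (pc oct : Int),
      (((pvPcs pc l).zip (pvPcs pc l).tail).foldl
        (fun (st : List Int × Int) pr =>
          let o := st.2 + (if pr.2 < pr.1 then 1 else 0)
          (st.1 ++ [o], o)) (octs ++ [oct], oct)).1 = octs ++ pvOcts pc oct l := by
  induction l with
  | nil => intro octs pc oct; simp [pvPcs, pvOcts]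
  | cons i t ih =>
    intro octs pc oct
    rw [pvPcs]
    rw [pvPcs_head (PySem.Int.mod (pc + i) 12) t]
    simp only [List.tail_cons, List.zip_cons_cons, List.foldl_cons]
    rw [← pvPcs_head]
    have := ih (octs ++ [oct]) (PySem.Int.mod (pc + i) 12)
      (oct + (if PySem.Int.mod (pc + i) 12 < pc then 1 else 0))
    simp only [List.append_assoc] at this ⊢
    rw [this, pvOcts]
    simp

lemma pv_zipMap (l : List Int) :
    ∀ (pc oct : Int),
      ((pvPcs pc l).zip (pvOcts pc oct l)).map (fun po =>
          String.ofList (PySem.List.pyGetD pvAlphabet po.1 [] ++ PySem.Int.toChars po.2))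
        = pvChain pc oct l := by
  induction l with
  | nil => intro pc oct; simp [pvPcs, pvOcts, pvChain, pvNote]
  | cons i t ih =>
    intro pc oct
    rw [pvPcs, pvOcts, pvChain]
    simp only [List.zip_cons_cons, List.map_cons]
    rw [pv_ite, ih]
    simp [pvNote]

-- ===== VERDICT (by name: the statement is the Claim_ definition above) =====
theorem notes_from_scale_spec : Claim_equal_notes_from_scale := by
  intro s intervals octave _hdom hpre
  obtain ⟨hne, hmem⟩ := hpre
  unfold Spec_notes_from_scale notes_from_scale notes_from_scale_alt
  rcases hl : s.toList with _ | ⟨c, rest⟩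
  · exact absurd hl hne
  have hget : PySem.Str.pyGet? s 0 = some c := by
    simp [PySem.Str.pyGet?, hl]
  rw [hl] at hmem
  simp only [List.headD_cons] at hmem
  obtain ⟨i0, hi0⟩ := Option.isSome_iff_exists.mp
    ((PySem.List.index?_isSome_iff _ _).mpr hmem)
  simp only [hget, hi0]
  have hstart : PySem.List.pyGetD pvAlphabet ((i0 : Nat) : Int) [] = [PySem.Chars.upperChar c] :=
    pv_index_pyGetD pvAlphabet _ [] i0 hi0
  set l := PySem.List.slice intervals none (some (-1)) with hldef
  -- A side
  have hA := pv_foldA l [String.ofList ([PySem.Chars.upperChar c] ++ PySem.Int.toChars octave)]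
      (i0 : Int) octave
  -- B side
  have hPcs := pv_foldPcs l [] (i0 : Int)
  simp only [List.nil_append] at hPcs
  rw [hA, hPcs, PySem.List.slice_from_one]
  have hOcts := pv_foldOcts l [] (i0 : Int) octave
  simp only [List.nil_append] at hOcts
  rw [hOcts, pv_zipMap]
  rw [pvChain_head (i0 : Int) octave l]
  simp [pvNote, hstart]
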